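-- pv_equiv track=rewrite | github.com/Darveloper1/ubscc2025 | solved.py | min_boats_needed
-- ===== SOURCE A (Python) =====
-- def min_boats_needed(slots):
--     """Sweep-line max concurrency; ends free boats before equal-time starts."""
--     if not slots:
--         return 0
--     starts = sorted(s for s, _ in slots)
--     ends   = sorted(e for _, e in slots)
--     i = j = 0
--     active = max_active = 0
--     n = len(starts)
--     while i < n and j < n:
--         if starts[i] < ends[j]:
--             active += 1
--             if active > max_active: max_active = active
--             i += 1
--         else:
--             active -= 1
--             j += 1
--     return max_active
-- ===== SOURCE B (Python) =====
-- def min_boats_needed(slots):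
--     """Counting formulation: max concurrency = max over start times s of
--     (#starts <= s) - (#ends <= s), floored at 0. No sorting."""
--     best = 0
--     for s, _ in slots:
--         c = 0
--         for s2, e2 in slots:
--             if s2 <= s:
--                 c += 1
--             if e2 <= s:
--                 c -= 1
--         if c > best:
--             best = c
--     return best
-- ===== Notes on version B (the rewrite author's own statement) =====
-- stated objective: alternative
-- what changed: Replaced the sort-then-two-pointer sweep by a sort-free counting formulation: the answer is the maximum over start times s of (#starts <= s) - (#ends <= s), floored at 0, computed by a direct double loop.
import Mathlib
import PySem

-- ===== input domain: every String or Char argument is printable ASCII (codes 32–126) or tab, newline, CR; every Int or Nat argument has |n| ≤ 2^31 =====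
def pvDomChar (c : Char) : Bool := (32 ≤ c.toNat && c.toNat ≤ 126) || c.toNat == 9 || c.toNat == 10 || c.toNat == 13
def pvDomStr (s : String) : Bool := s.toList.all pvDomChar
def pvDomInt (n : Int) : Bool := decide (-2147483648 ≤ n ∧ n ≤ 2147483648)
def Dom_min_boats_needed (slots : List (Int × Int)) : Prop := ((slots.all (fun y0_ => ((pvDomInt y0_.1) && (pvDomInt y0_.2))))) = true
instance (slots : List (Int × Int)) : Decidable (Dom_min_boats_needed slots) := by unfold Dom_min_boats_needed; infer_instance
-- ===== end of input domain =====

-- B replaces A's sort-then-two-pointer sweep by a sort-free counting formulation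
-- (max over start times s of #starts ≤ s minus #ends ≤ s, floored at 0); objective: alternative.

-- ===== PORT A =====
-- A's while loop over the two sorted index arrays, as structural recursion on the
-- two (initially equal-length) sorted lists; loop ends when either side is exhausted.
def pvLoopA : List Int → List Int → Int → Int → Int
  | s :: S, e :: E, active, maxA =>
      if s < e then
        pvLoopA S (e :: E) (active + 1) (if active + 1 > maxA then active + 1 else maxA)
      else
        pvLoopA (s :: S) E (active - 1) maxA
  | _, _, _, maxA => maxA
termination_by S E _ _ => S.length + E.length

def min_boats_needed (slots : List (Int × Int)) : Int :=
  if slots = [] then 0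
  else
    pvLoopA (PySem.List.sorted (slots.map Prod.fst) (fun x => x) false)
            (PySem.List.sorted (slots.map Prod.snd) (fun x => x) false) 0 0

-- ===== PORT B =====
-- inner loop of Source B: signed count of starts ≤ s minus ends ≤ s
def pvConc (slots : List (Int × Int)) (s : Int) : Int :=
  slots.foldl (fun c p =>
    let c1 := if p.1 ≤ s then c + 1 else c
    if p.2 ≤ s then c1 - 1 else c1) 0

def min_boats_needed_alt (slots : List (Int × Int)) : Int :=
  slots.foldl (fun best p =>
    let c := pvConc slots p.1
    if c > best then c else best) 0

-- ===== PRECONDITION & SPEC =====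
def Spec_min_boats_needed (slots : List (Int × Int)) (out : Int) : Prop := out = min_boats_needed_alt slots
instance (slots : List (Int × Int)) (out : Int) : Decidable (Spec_min_boats_needed slots out) := by unfold Spec_min_boats_needed; infer_instance

-- ===== CLAIM (what is proved, stated in full; the proofs are below) =====
def Claim_equal_min_boats_needed : Prop := ∀ (slots : List (Int × Int)), Dom_min_boats_needed slots → Spec_min_boats_needed slots (min_boats_needed slots)

-- ===== LEMMAS AND PROOFS =====

-- the per-start value both programs maximise: active + #{x ∈ S | x ≤ s} - #{x ∈ E | x ≤ s}
def pvF (S E : List Int) (active : Int) (s : Int) : Int :=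
  active + (S.countP (fun x => decide (x ≤ s)) : Int) - (E.countP (fun x => decide (x ≤ s)) : Int)

theorem pv_foldl_max_of_le {l : List Int} {m : Int} (h : ∀ a ∈ l, a ≤ m) :
    l.foldl max m = m := by
  induction l generalizing m with
  | nil => rfl
  | cons x t ih =>
      simp only [List.foldl_cons]
      have hx : max m x = m := by
        have := h x (by simp); omega
      rw [hx]
      exact ih (fun a ha => h a (by simp [ha]))

theorem pv_foldl_max_absorb {l : List Int} {m a : Int} (h : a ∈ l) :
    l.foldl max (max m a) = l.foldl max m := by
  induction l generalizing m with
  | nil => exact absurd h (by simp)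
  | cons x t ih =>
      simp only [List.foldl_cons]
      rcases List.mem_cons.mp h with rfl | ht
      · have : max (max m a) a = max m a := by omega
        rw [this]
      · have : max (max m a) x = max (max m x) a := by omega
        rw [this, ih ht]

-- main characterisation of A's merge loop on sorted lists
theorem pvLoopA_eq (n : Nat) : ∀ (S E : List Int) (active maxA : Int),
    S.length + E.length ≤ n →
    S.Pairwise (· ≤ ·) → E.Pairwise (· ≤ ·) →
    active + S.length - E.length ≤ maxA →
    pvLoopA S E active maxA = (S.map (pvF S E active)).foldl max maxA := by
  induction n with
  | zero =>
      intro S E active maxA hn _ _ _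
      have hS : S = [] := by
        cases S <;> simp_all
      subst hS
      simp [pvLoopA]
  | succ n ih =>
      intro S E active maxA hn hS hE hinv
      match S, E with
      | [], E => simp [pvLoopA]
      | s :: S, [] =>
          rw [pvLoopA.eq_def]
          symm
          apply pv_foldl_max_of_le
          intro a ha
          rcases List.mem_map.mp ha with ⟨x, hx, rfl⟩
          have hcnt : ((s :: S).countP (fun y => decide (y ≤ x)) : Int) ≤ (s :: S).length := by
            exact_mod_cast List.countP_le_length
          simp only [pvF, List.countP_nil, List.length_cons, List.length_nil] at *
          omega
      | s :: S, e :: E =>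
          rw [pvLoopA]
          have hSlen : S.length + (e :: E).length ≤ n := by simp at hn ⊢; omega
          have hS' : S.Pairwise (· ≤ ·) := hS.of_cons
          have hEs : ∀ x ∈ E, e ≤ x := by
            intro x hx; exact List.rel_of_pairwise_cons hE hx
          have hSs : ∀ x ∈ S, s ≤ x := by
            intro x hx; exact List.rel_of_pairwise_cons hS hx
          by_cases hse : s < e
          · rw [if_pos hse]
            have hmax : (if active + 1 > maxA then active + 1 else maxA) = max maxA (active + 1) := by
              split_ifs <;> omega
            rw [hmax]
            have hinv' : active + 1 + (S.length : Int) - (e :: E).length ≤ max maxA (active + 1) := by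
              simp only [List.length_cons] at hinv ⊢
              omega
            rw [ih S (e :: E) (active + 1) (max maxA (active + 1)) hSlen hS' hE hinv']
            -- rewrite the tail map: each x ∈ S has s ≤ x, so counting s adds 1
            have hmapeq : S.map (pvF (s :: S) (e :: E) active) = S.map (pvF S (e :: E) (active + 1)) := by
              apply List.map_congr_left
              intro x hx
              have hsx : s ≤ x := hSs x hx
              simp [pvF, List.countP_cons, hsx]
              omega
            -- count of ends ≤ s is 0 (s < e ≤ every end)
            have hcntE : (e :: E).countP (fun y => decide (y ≤ s)) = 0 := by
              rw [List.countP_eq_zero]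
              intro y hy
              rcases List.mem_cons.mp hy with rfl | hy'
              · simp; omega
              · have := hEs y hy'; simp; omega
            have hhead : pvF (s :: S) (e :: E) active s
                = active + 1 + (S.countP (fun y => decide (y ≤ s)) : Int) := by
              simp [pvF, hcntE]
              omega
            simp only [List.map_cons, List.foldl_cons]
            rw [hmapeq]
            by_cases hk : S.countP (fun y => decide (y ≤ s)) = 0
            · have : max maxA (pvF (s :: S) (e :: E) active s) = max maxA (active + 1) := by
                rw [hhead, hk]; push_cast; ring_nf
              rw [this]
            · -- s occurs again in S; its mapped value equals the head value and absorbs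
              have hmem : s ∈ S := by
                rcases List.countP_pos_iff.mp (Nat.pos_of_ne_zero hk) with ⟨y, hy, hle⟩
                have hys : y ≤ s := by simpa using hle
                have : y = s := le_antisymm hys (hSs y hy)
                exact this ▸ hy
              have hval : pvF S (e :: E) (active + 1) s = pvF (s :: S) (e :: E) active s := by
                simp [pvF, hcntE]
                omega
              have hmemv : pvF (s :: S) (e :: E) active s ∈ S.map (pvF S (e :: E) (active + 1)) := by
                rw [← hval]; exact List.mem_map_of_mem hmem
              have h1 : max maxA (pvF (s :: S) (e :: E) active s)
                  = max (max maxA (active + 1)) (pvF (s :: S) (e :: E) active s) := by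
                have : active + 1 ≤ pvF (s :: S) (e :: E) active s := by
                  rw [hhead]
                  have : (0:Int) ≤ (S.countP (fun y => decide (y ≤ s)) : Int) := by positivity
                  omega
                omega
              rw [h1, pv_foldl_max_absorb hmemv]
          · rw [if_neg hse]
            have hes : e ≤ s := by omega
            have hElen : (s :: S).length + E.length ≤ n := by simp at hn ⊢; omega
            have hinv' : active - 1 + ((s :: S).length : Int) - E.length ≤ maxA := by
              simp only [List.length_cons] at hinv ⊢
              omega
            rw [ih (s :: S) E (active - 1) maxA hElen hS hE.of_cons hinv']
            apply congrArg (fun l => List.foldl max maxA l)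
            apply List.map_congr_left
            intro x hx
            have hsx : s ≤ x := by
              rcases List.mem_cons.mp hx with rfl | hx'
              · exact le_refl x
              · exact hSs x hx'
            have hex : decide (e ≤ x) = true := by simp; omega
            simp [pvF, List.countP_cons, hex]
            omega

-- B's inner loop computes the signed count
theorem pvConc_eq (slots : List (Int × Int)) (s : Int) :
    pvConc slots s = (slots.countP (fun p => decide (p.1 ≤ s)) : Int)
                   - (slots.countP (fun p => decide (p.2 ≤ s)) : Int) := by
  suffices h : ∀ (l : List (Int × Int)) (c : Int),
      l.foldl (fun c p => let c1 := if p.1 ≤ s then c + 1 else c;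
                          if p.2 ≤ s then c1 - 1 else c1) c
      = c + (l.countP (fun p => decide (p.1 ≤ s)) : Int) - (l.countP (fun p => decide (p.2 ≤ s)) : Int) by
    simpa [pvConc] using h slots 0
  intro l
  induction l with
  | nil => intro c; simp
  | cons p t iht =>
      intro c
      simp only [List.foldl_cons, List.countP_cons]
      rw [iht]
      split_ifs <;> push_cast <;> simp_all <;> omega

theorem pv_foldl_max_perm {l1 l2 : List Int} (h : l1.Perm l2) :
    ∀ m : Int, l1.foldl max m = l2.foldl max m := by
  induction h with
  | nil => intro m; rfl
  | cons x _ ih => intro m; simp only [List.foldl_cons]; exact ih _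
  | swap x y l =>
      intro m
      simp only [List.foldl_cons]
      have : max (max m y) x = max (max m x) y := by omega
      rw [this]
  | trans _ _ ih1 ih2 => intro m; rw [ih1, ih2]

-- B as a running max over the mapped concurrency values
theorem pvAlt_eq (slots : List (Int × Int)) :
    min_boats_needed_alt slots = (slots.map (fun p => pvConc slots p.1)).foldl max 0 := by
  unfold min_boats_needed_alt
  rw [List.foldl_map]
  apply PySem.List.foldl_congr_mem
  intro acc p _
  dsimp only
  split_ifs <;> omega

-- ===== VERDICT (by name: the statement is the Claim_ definition above) =====
theorem min_boats_needed_spec : Claim_equal_min_boats_needed := by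
  intro slots _
  unfold Spec_min_boats_needed
  by_cases h : slots = []
  · subst h; simp [min_boats_needed, min_boats_needed_alt]
  · rw [min_boats_needed, if_neg h]
    have hSperm : (PySem.List.sorted (slots.map Prod.fst) (fun x => x) false).Perm (slots.map Prod.fst) :=
      PySem.List.sorted_perm _ _ _
    have hEperm : (PySem.List.sorted (slots.map Prod.snd) (fun x => x) false).Perm (slots.map Prod.snd) :=
      PySem.List.sorted_perm _ _ _
    have hSp : (PySem.List.sorted (slots.map Prod.fst) (fun x => x) false).Pairwise (· ≤ ·) :=
      PySem.List.sorted_pairwise _ _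
    have hEp : (PySem.List.sorted (slots.map Prod.snd) (fun x => x) false).Pairwise (· ≤ ·) :=
      PySem.List.sorted_pairwise _ _
    have hlen : (PySem.List.sorted (slots.map Prod.fst) (fun x => x) false).length
        = (PySem.List.sorted (slots.map Prod.snd) (fun x => x) false).length := by
      rw [hSperm.length_eq, hEperm.length_eq]; simp
    rw [pvLoopA_eq (_ + _) _ _ 0 0 le_rfl hSp hEp (by rw [hlen]; omega)]
    -- each mapped value equals pvConc over the original slots
    have hcnt : ∀ s : Int,
        pvF (PySem.List.sorted (slots.map Prod.fst) (fun x => x) false)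
            (PySem.List.sorted (slots.map Prod.snd) (fun x => x) false) 0 s
        = pvConc slots s := by
      intro s
      rw [pvConc_eq]
      unfold pvF
      rw [hSperm.countP_eq, hEperm.countP_eq, List.countP_map, List.countP_map]
      simp only [Function.comp_def]
      omega
    rw [List.map_congr_left (fun s _ => hcnt s)]
    rw [pvAlt_eq]
    apply pv_foldl_max_perm
    calc ((PySem.List.sorted (slots.map Prod.fst) (fun x => x) false).map (fun s => pvConc slots s)).Perm
          ((slots.map Prod.fst).map (fun s => pvConc slots s)) := hSperm.map _
      _ = slots.map (fun p => pvConc slots p.1) := by rw [List.map_map]; rfl
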